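-- pv_equiv track=rewrite | github.com/TonyRmaili/char_sheet | dice.py | evaluate_hits
-- ===== SOURCE A (Python) =====
-- def evaluate_hits(attacks):
--     hits=0
--     crits=0
--     for attack in attacks:
--         if attack[0] =='crit':
--             crits+=1
--         elif attack[0] == 'hit':
--             hits+=1
--     return hits,crits
-- ===== SOURCE B (Python) =====
-- def evaluate_hits(attacks):
--     outcomes = [a[0] for a in attacks]
--     return outcomes.count('hit'), outcomes.count('crit')
-- ===== Notes on version B (the rewrite author's own statement) =====
-- stated objective: idiomatic
-- what changed: Replaces the single branchy if/elif accumulator loop with a projection of the first elements followed by two independent list.count scans, so no per-element branching or running state remains.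
import Mathlib
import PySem

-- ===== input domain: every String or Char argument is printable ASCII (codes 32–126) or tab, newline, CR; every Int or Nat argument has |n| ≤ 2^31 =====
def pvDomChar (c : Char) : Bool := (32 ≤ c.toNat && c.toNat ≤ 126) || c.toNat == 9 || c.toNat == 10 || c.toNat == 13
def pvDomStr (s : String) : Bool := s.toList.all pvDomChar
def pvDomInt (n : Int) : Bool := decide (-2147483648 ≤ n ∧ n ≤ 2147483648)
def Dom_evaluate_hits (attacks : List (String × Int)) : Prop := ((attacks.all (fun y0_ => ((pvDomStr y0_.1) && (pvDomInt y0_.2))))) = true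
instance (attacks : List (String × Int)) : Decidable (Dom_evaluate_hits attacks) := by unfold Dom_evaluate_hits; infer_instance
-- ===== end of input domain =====

-- ===== PORT A =====
-- B projects the first elements and counts 'hit' and 'crit' with two list.count scans; objective: idiomatic.
def evaluate_hits (attacks : List (String × Int)) : Int × Int :=
  let st := attacks.foldl (fun (st : Int × Int) attack =>
    if attack.1 == "crit" then (st.1, st.2 + 1)
    else if attack.1 == "hit" then (st.1 + 1, st.2)
    else st) (0, 0)
  (st.1, st.2)

-- ===== PORT B =====
def evaluate_hits_alt (attacks : List (String × Int)) : Int × Int :=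
  let outcomes := attacks.map (·.1)
  ((PySem.List.count outcomes "hit" : Int), (PySem.List.count outcomes "crit" : Int))

-- ===== PRECONDITION & SPEC =====
def Spec_evaluate_hits (attacks : List (String × Int)) (out : Int × Int) : Prop := out = evaluate_hits_alt attacks
instance (attacks : List (String × Int)) (out : Int × Int) : Decidable (Spec_evaluate_hits attacks out) := by unfold Spec_evaluate_hits; infer_instance

-- ===== CLAIM (what is proved, stated in full; the proofs are below) =====
def Claim_equal_evaluate_hits : Prop := ∀ (attacks : List (String × Int)), Dom_evaluate_hits attacks → Spec_evaluate_hits attacks (evaluate_hits attacks)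

-- ===== LEMMAS AND PROOFS =====
theorem foldl_count (attacks : List (String × Int)) (h c : Int) :
    attacks.foldl (fun (st : Int × Int) attack =>
      if attack.1 == "crit" then (st.1, st.2 + 1)
      else if attack.1 == "hit" then (st.1 + 1, st.2)
      else st) (h, c)
    = (h + ((attacks.map (·.1)).count "hit" : Int),
       c + ((attacks.map (·.1)).count "crit" : Int)) := by
  induction attacks generalizing h c with
  | nil => simp
  | cons a t ih =>
    rw [List.foldl_cons]
    by_cases hcr : a.1 = "crit"
    · rw [if_pos (by simp [hcr]), ih]
      simp [List.count_cons, hcr, Prod.ext_iff]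
      ring
    · rw [if_neg (by simp [hcr])]
      by_cases hh : a.1 = "hit"
      · rw [if_pos (by simp [hh]), ih]
        simp [List.count_cons, hh, Prod.ext_iff]
        ring
      · rw [if_neg (by simp [hh]), ih]
        simp [hcr, hh]

-- ===== VERDICT (by name: the statement is the Claim_ definition above) =====
theorem evaluate_hits_spec : Claim_equal_evaluate_hits := by
  intro attacks _
  unfold Spec_evaluate_hits evaluate_hits evaluate_hits_alt
  simp only [foldl_count, PySem.List.count_eq]
  simp
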